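-- pv_equiv track=rewrite | github.com/RedstonePilot/Uni-Stufff | Semester_1/Software Asessment/question_1.py | string_pattern
-- ===== SOURCE A (Python) =====
-- def string_pattern(size):
--     """Returns a pattern based on the number entered
--
--     Args:
--         size (int): width of the pattern
--
--     Raises:
--         ValueError: If size is less than or equal to 2
--
--     Returns:
--         string: string of the pattern to be printed out.
--         Each line has a "new line character" at the end
--     """
--     if size <= 2:
--         raise ValueError("Size must be larger than or equal to 3")
--
--     output = [f"+{'-'*(size-2)}+\n"]
--     for i in range(1, size//2):
--         output.append(f"{'-'*(i)}+{'-'*(size-(2+i*2))}+{'-'*(i)}\n")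
--
--     first_half = output.copy()
--     first_half.reverse()
--     if size % 2 == 1:
--         output.append(f"{'-'*(size//2)}+{'-'*(size//2)}\n")
--
--     output += first_half
--     return "".join(output)
-- ===== SOURCE B (Python) =====
-- def string_pattern(size):
--     """Same pattern as A, built by a direct row-index-to-line mapping."""
--     if size <= 2:
--         raise ValueError("Size must be larger than or equal to 3")
--     lines = []
--     for r in range(size):
--         d = min(r, size - 1 - r)
--         if size % 2 == 1 and r == size // 2:
--             lines.append('-' * d + '+' + '-' * d + '\n')
--         else:
--             lines.append('-' * d + '+' + '-' * (size - 2 - 2 * d) + '+' + '-' * d + '\n')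
--     return ''.join(lines)
-- ===== Notes on version B (the rewrite author's own statement) =====
-- stated objective: simpler
-- what changed: B replaces A's build-top-half/copy/reverse/append-middle/concatenate construction with a single pass over all row indices, computing each line directly from d = min(r, size-1-r); no mirroring or list reversal.
-- outside the precondition, e.g. on string_pattern(2): A raises ValueError, B raises ValueError
import Mathlib
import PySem

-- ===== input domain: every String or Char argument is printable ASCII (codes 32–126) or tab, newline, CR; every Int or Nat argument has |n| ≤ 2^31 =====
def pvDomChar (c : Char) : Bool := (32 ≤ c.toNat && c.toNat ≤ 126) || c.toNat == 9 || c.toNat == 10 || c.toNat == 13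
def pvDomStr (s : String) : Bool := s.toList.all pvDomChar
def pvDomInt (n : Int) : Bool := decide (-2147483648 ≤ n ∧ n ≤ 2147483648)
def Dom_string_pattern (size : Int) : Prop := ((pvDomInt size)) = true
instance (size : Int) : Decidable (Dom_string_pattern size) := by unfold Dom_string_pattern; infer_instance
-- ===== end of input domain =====

-- B builds the pattern in a single pass over all row indices (d = min(r, size-1-r))
-- instead of A's build-top-half / copy / reverse / concatenate construction; same cost, simpler.

-- Python "'-' * n" (empty for n ≤ 0) — shared primitive of both ports; exact.
def pyDash (n : Int) : String := String.ofList (List.replicate n.toNat '-')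

-- ===== PORT A =====
def string_pattern (size : Int) : String :=
  if size ≤ 2 then ""   -- Python raises ValueError here; excluded by Pre_
  else
    let output : List String := ["+" ++ pyDash (size - 2) ++ "+\n"]
    let output := (PySem.List.pyRange 1 (PySem.Int.floordiv size 2) 1).foldl
      (fun acc i => acc ++ [pyDash i ++ "+" ++ pyDash (size - (2 + i * 2)) ++ "+" ++ pyDash i ++ "\n"])
      output
    let firstHalf := output.reverse
    let output := if PySem.Int.mod size 2 == 1 then
        output ++ [pyDash (PySem.Int.floordiv size 2) ++ "+" ++ pyDash (PySem.Int.floordiv size 2) ++ "\n"]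
      else output
    PySem.Str.join "" (output ++ firstHalf)

-- ===== PORT B =====
def string_pattern_alt (size : Int) : String :=
  if size ≤ 2 then ""   -- Python raises ValueError here; excluded by Pre_
  else
    let lines := (PySem.List.pyRange 0 size 1).foldl
      (fun acc r =>
        let d := min r (size - 1 - r)
        if PySem.Int.mod size 2 == 1 && r == PySem.Int.floordiv size 2 then
          acc ++ [pyDash d ++ "+" ++ pyDash d ++ "\n"]
        else
          acc ++ [pyDash d ++ "+" ++ pyDash (size - 2 - 2 * d) ++ "+" ++ pyDash d ++ "\n"])
      []
    PySem.Str.join "" lines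

-- ===== PRECONDITION & SPEC =====
-- A raises ValueError for size ≤ 2; exactly those inputs are excluded.
def Pre_string_pattern (size : Int) : Prop := 3 ≤ size
instance (size : Int) : Decidable (Pre_string_pattern size) := by unfold Pre_string_pattern; infer_instance
def pvWitness_string_pattern : Int := (5)

def Spec_string_pattern (size : Int) (out : String) : Prop := out = string_pattern_alt size
instance (size : Int) (out : String) : Decidable (Spec_string_pattern size out) := by unfold Spec_string_pattern; infer_instance

-- ===== CLAIM (what is proved, stated in full; the proofs are below) =====
def Claim_equal_string_pattern : Prop := ∀ (size : Int), Dom_string_pattern size → Pre_string_pattern size → Spec_string_pattern size (string_pattern size)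

-- ===== LEMMAS AND PROOFS =====

-- 'append one element' fold = map
theorem pvFoldlPush {α β : Type} (f : α → β) (l : List α) (init : List β) :
    l.foldl (fun acc x => acc ++ [f x]) init = init ++ l.map f := by
  induction l generalizing init with
  | nil => simp
  | cons a t ih => simp [List.foldl, ih]

-- the generic line of the pattern
def pvLine (size d : Int) : String :=
  pyDash d ++ "+" ++ pyDash (size - 2 - 2 * d) ++ "+" ++ pyDash d ++ "\n"

-- mirrored second half: mapping r ↦ s-1-r over the bottom range reverses the top range
theorem pvMirror (f : Int → String) (s h : Int) (h0 : 0 ≤ h) :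
    (PySem.List.pyRange (s - h) s 1).map (fun r => f (s - 1 - r)) =
      ((PySem.List.pyRange 0 h 1).map f).reverse := by
  apply List.ext_getElem
  · simp [PySem.List.length_pyRange_one]
  · intro k hk1 hk2
    simp only [List.getElem_map, List.getElem_reverse, List.length_map,
      PySem.List.length_pyRange_one, PySem.List.getElem_pyRange_one]
    congr 1
    simp only [PySem.List.length_pyRange_one, List.length_map] at hk1 hk2
    omega

theorem pvA_lines (size : Int) (h3 : 3 ≤ size) :
    string_pattern size =
      PySem.Str.join ""
        (((PySem.List.pyRange 0 (PySem.Int.floordiv size 2) 1).map (pvLine size) ++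
          (if PySem.Int.mod size 2 == 1 then
            [pyDash (PySem.Int.floordiv size 2) ++ "+" ++ pyDash (PySem.Int.floordiv size 2) ++ "\n"]
           else [])) ++
         ((PySem.List.pyRange 0 (PySem.Int.floordiv size 2) 1).map (pvLine size)).reverse) := by
  have h2 : ¬ size ≤ 2 := by omega
  have h1 : (1:Int) ≤ PySem.Int.floordiv size 2 := by
    rw [PySem.Int.le_floordiv_iff_mul_le (by norm_num)]; omega
  unfold string_pattern
  rw [if_neg h2]
  simp only [pvFoldlPush, List.singleton_append]
  have hmap : ("+" ++ pyDash (size - 2) ++ "+\n") ::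
      (PySem.List.pyRange 1 (PySem.Int.floordiv size 2) 1).map
        (fun i => pyDash i ++ "+" ++ pyDash (size - (2 + i * 2)) ++ "+" ++ pyDash i ++ "\n") =
      (PySem.List.pyRange 0 (PySem.Int.floordiv size 2) 1).map (pvLine size) := by
    rw [PySem.List.pyRange_one_cons (by omega : (0:Int) < PySem.Int.floordiv size 2),
      List.map_cons]
    congr 1
    · apply String.toList_inj.mp
      simp [pvLine, pyDash]
    · apply List.map_congr_left
      intro i _
      unfold pvLine
      have harith : size - (2 + i * 2) = size - 2 - 2 * i := by ring
      rw [harith]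
  rw [hmap]
  cases hc : (PySem.Int.mod size 2 == 1) <;> simp [hc]

theorem pvB_lines (size : Int) (h3 : 3 ≤ size) :
    string_pattern_alt size =
      PySem.Str.join ""
        ((PySem.List.pyRange 0 size 1).map (fun r =>
          if PySem.Int.mod size 2 == 1 && r == PySem.Int.floordiv size 2 then
            pyDash (min r (size - 1 - r)) ++ "+" ++ pyDash (min r (size - 1 - r)) ++ "\n"
          else pvLine size (min r (size - 1 - r)))) := by
  have h2 : ¬ size ≤ 2 := by omega
  unfold string_pattern_alt
  rw [if_neg h2]
  have hf : (fun (acc : List String) (r : Int) =>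
      let d := min r (size - 1 - r)
      if PySem.Int.mod size 2 == 1 && r == PySem.Int.floordiv size 2 then
        acc ++ [pyDash d ++ "+" ++ pyDash d ++ "\n"]
      else acc ++ [pyDash d ++ "+" ++ pyDash (size - 2 - 2 * d) ++ "+" ++ pyDash d ++ "\n"]) =
      (fun acc r => acc ++
        [if PySem.Int.mod size 2 == 1 && r == PySem.Int.floordiv size 2 then
          pyDash (min r (size - 1 - r)) ++ "+" ++ pyDash (min r (size - 1 - r)) ++ "\n"
         else pvLine size (min r (size - 1 - r))]) := by
    funext acc r
    cases hc : (PySem.Int.mod size 2 == 1 && r == PySem.Int.floordiv size 2) <;>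
      simp [hc, pvLine]
  rw [hf, pvFoldlPush]
  simp

-- ===== VERDICT (by name: the statement is the Claim_ definition above) =====
theorem string_pattern_spec : Claim_equal_string_pattern := by
  intro size _ hpre
  unfold Spec_string_pattern
  have h3 : 3 ≤ size := hpre
  rw [pvA_lines size h3, pvB_lines size h3]
  have hh : PySem.Int.floordiv size 2 = size / 2 := PySem.Int.floordiv_eq_ediv_of_pos (by norm_num)
  have hmm : PySem.Int.mod size 2 = size % 2 := PySem.Int.mod_eq_emod_of_pos (by norm_num)
  rw [hh, hmm]
  have hq1 : (1:Int) ≤ size / 2 := by omega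
  have hsplit : PySem.List.pyRange 0 size 1 =
      PySem.List.pyRange 0 (size / 2) 1 ++ PySem.List.pyRange (size / 2) size 1 :=
    PySem.List.pyRange_one_append 0 (size / 2) size (by omega) (by omega)
  rw [hsplit, List.map_append]
  have htop : (PySem.List.pyRange 0 (size / 2) 1).map (fun r =>
      if size % 2 == 1 && r == size / 2 then
        pyDash (min r (size - 1 - r)) ++ "+" ++ pyDash (min r (size - 1 - r)) ++ "\n"
      else pvLine size (min r (size - 1 - r))) =
      (PySem.List.pyRange 0 (size / 2) 1).map (pvLine size) := by
    apply List.map_congr_left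
    intro r hr
    rw [PySem.List.mem_pyRange_one] at hr
    have hne : (r == size / 2) = false := by simp; omega
    have hmin : min r (size - 1 - r) = r := by omega
    simp [hne, hmin]
  rw [htop]
  have hbot : ∀ a : Int, a = size - size / 2 →
      (∀ r : Int, a ≤ r → (((size % 2 : Int) == 1) && (r == size / 2)) = false) →
      (PySem.List.pyRange a size 1).map (fun r =>
        if size % 2 == 1 && r == size / 2 then
          pyDash (min r (size - 1 - r)) ++ "+" ++ pyDash (min r (size - 1 - r)) ++ "\n"
        else pvLine size (min r (size - 1 - r))) =
      ((PySem.List.pyRange 0 (size / 2) 1).map (pvLine size)).reverse := by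
    intro a ha hcond
    have hstep : (PySem.List.pyRange a size 1).map (fun r =>
        if size % 2 == 1 && r == size / 2 then
          pyDash (min r (size - 1 - r)) ++ "+" ++ pyDash (min r (size - 1 - r)) ++ "\n"
        else pvLine size (min r (size - 1 - r))) =
        (PySem.List.pyRange a size 1).map (fun r => pvLine size (size - 1 - r)) := by
      apply List.map_congr_left
      intro r hr
      rw [PySem.List.mem_pyRange_one] at hr
      have hmin : min r (size - 1 - r) = size - 1 - r := by omega
      rw [hcond r hr.1, hmin]
      simp
    rw [hstep, ha]
    exact pvMirror (pvLine size) size (size / 2) (by omega)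
  rcases Int.emod_two_eq_zero_or_one size with hm | hm
  · -- even: no middle line
    have hc : ((size % 2 : Int) == 1) = false := by simp [hm]
    rw [hbot (size / 2) (by omega) (by intro r hr; simp [hm])]
    simp [hc]
  · -- odd: middle line at r = size / 2
    have hc : ((size % 2 : Int) == 1) = true := by simp [hm]
    rw [show PySem.List.pyRange (size / 2) size 1 =
        (size / 2) :: PySem.List.pyRange (size / 2 + 1) size 1 from
      PySem.List.pyRange_one_cons (by omega), List.map_cons]
    rw [hbot (size / 2 + 1) (by omega) (by intro r hr; simp; omega)]
    have hmid : (if size % 2 == 1 && ((size / 2 : Int) == size / 2) then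
        pyDash (min (size / 2) (size - 1 - size / 2)) ++ "+" ++
          pyDash (min (size / 2) (size - 1 - size / 2)) ++ "\n"
      else pvLine size (min (size / 2) (size - 1 - size / 2))) =
        pyDash (size / 2) ++ "+" ++ pyDash (size / 2) ++ "\n" := by
      have hmin : min (size / 2) (size - 1 - size / 2) = size / 2 := by omega
      simp [hc, hmin]
    rw [hmid]
    simp [hc]
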